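-- pv_equiv track=rewrite | github.com/mal1on/checkio-solutions | OReilly/Nonogram Encode.py | nonogram_encode
-- ===== SOURCE A (Python) =====
-- def nonogram_encode(data: list[str]) -> list[list[list[int]]]:
--     # your code here
--
--     def rotate(data):
--         result = []
--         for ind in range(len(data[0])):
--             temp = ''
--             for row in data:
--                 temp += row[ind]
--             result.append(temp)
--         return result
--
--     def clue(side):
--         result = []
--         for item in side:
--             temp = []
--             temp_sub = 0
--             for sub in item:
--                 if sub == 'X':
--                     temp_sub += 1
--                 else:
--                     if temp_sub:
--                         temp.append(temp_sub)
--                     temp_sub = 0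
--             if temp_sub != 0:
--                 temp.append(temp_sub)
--             result.append(temp)
--
--         max_len = len(max(result, key=len))
--         filled = []
--         for item in result:
--             while len(item) < max_len:
--                 item = [0] + item
--             filled.append(item)
--
--         return filled
--
--     rc = clue(data)
--     cols = rotate(data)
--     cc = list(map(list, zip(*clue(cols))))
--
--     return [cc, rc]
-- ===== SOURCE B (Python) =====
-- def nonogram_encode(data: list[str]) -> list[list[list[int]]]:
--     # scan each line by stripping leading runs instead of a per-char counter loop;
--     # pad with a computed zero-prefix instead of a while loop; build columns by direct indexing
--     def runs(line):
--         out = []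
--         rest = line
--         while rest:
--             if rest[0] == 'X':
--                 block = len(rest) - len(rest.lstrip('X'))
--                 out.append(block)
--                 rest = rest[block:]
--             else:
--                 rest = rest[1:]
--         return out
--
--     def pad(clues):
--         m = max(len(c) for c in clues)
--         return m, [[0] * (m - len(c)) + c for c in clues]
--
--     _, rc = pad([runs(row) for row in data])
--     w = len(data[0])
--     m, col_clues = pad([runs(''.join(row[i] for row in data)) for i in range(w)])
--     cc = [[col[i] for col in col_clues] for i in range(m)]
--     return [cc, rc]
-- ===== Notes on version B (the rewrite author's own statement) =====
-- stated objective: simpler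
-- what changed: Per-line run counting by a counter loop becomes run-stripping on leading blocks, the while-loop zero-prepend padding becomes a computed replicate prefix, and the rotate helper plus zip(*...) transposition become direct index comprehensions.
import Mathlib
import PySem

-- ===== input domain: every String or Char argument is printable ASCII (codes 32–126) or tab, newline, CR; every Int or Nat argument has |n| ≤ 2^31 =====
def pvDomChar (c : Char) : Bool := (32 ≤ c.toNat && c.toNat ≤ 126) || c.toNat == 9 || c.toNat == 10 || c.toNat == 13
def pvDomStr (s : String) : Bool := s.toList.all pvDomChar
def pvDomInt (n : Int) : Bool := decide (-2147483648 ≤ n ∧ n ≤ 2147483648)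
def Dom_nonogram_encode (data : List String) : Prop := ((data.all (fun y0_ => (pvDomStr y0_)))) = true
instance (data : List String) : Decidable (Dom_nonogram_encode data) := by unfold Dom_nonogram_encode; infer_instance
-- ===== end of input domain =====

-- B replaces A's per-char counter loop, while-prepend padding and rotate helper by
-- run-stripping recursion, computed zero-prefix padding and direct index transposition (objective: simpler).

-- ===== PORT A =====

-- rotate(data): column strings by character append
def pvA_rotate (data : List String) : List (List Char) :=
  (PySem.List.pyRange 0 ((data.headD "").toList.length) 1).foldl
    (fun result ind =>
      result ++ [data.foldl (fun temp row => temp ++ [(PySem.List.pyGet? row.toList ind).getD ' ']) []])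
    []

-- the inner per-line counter loop of clue
def pvA_clueLine (item : List Char) : List Int :=
  let st := item.foldl
    (fun (st : List Int × Int) sub =>
      if sub = 'X' then (st.1, st.2 + 1)
      else (if st.2 ≠ 0 then st.1 ++ [st.2] else st.1, 0))
    ([], 0)
  if st.2 ≠ 0 then st.1 ++ [st.2] else st.1

-- the while-loop `item = [0] + item`
def pvA_fill (max_len : Nat) (item : List Int) : List Int :=
  if item.length < max_len then pvA_fill max_len (0 :: item) else item
termination_by max_len - item.length

def pvA_clue (side : List (List Char)) : List (List Int) :=
  let result := side.foldl (fun acc item => acc ++ [pvA_clueLine item]) []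
  let max_len := ((PySem.List.max? result (fun l => l.length)).getD []).length
  result.foldl (fun filled item => filled ++ [pvA_fill max_len item]) []

-- zip(*ls) on equal-typed lists (Python truncates at the shortest list)
def pvA_zipStar (ls : List (List Int)) : List (List Int) :=
  if h : ls ≠ [] ∧ ls.all (fun l => !l.isEmpty) then
    (ls.map (fun l => l.headD 0)) :: pvA_zipStar (ls.map List.tail)
  else []
termination_by (ls.headD []).length
decreasing_by
  obtain ⟨h1, h2⟩ := h
  match ls, h1 with
  | a :: t, _ =>
    simp only [List.headD_cons]
    cases a with
    | nil => simp at h2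
    | cons x xs => simp

def nonogram_encode (data : List String) : List (List (List Int)) :=
  let rc := pvA_clue (data.map String.toList)
  let cols := pvA_rotate data
  let cc := pvA_zipStar (pvA_clue cols)
  [cc, rc]

-- ===== PORT B =====

-- runs: strip the leading block (or a single non-X char) and recurse
def pvB_runs (line : List Char) : List Int :=
  match line with
  | [] => []
  | c :: rest =>
    if c = 'X' then
      ((rest.takeWhile (fun x => x = 'X')).length + 1 : Int)
        :: pvB_runs (rest.dropWhile (fun x => x = 'X'))
    else pvB_runs rest
termination_by line.length
decreasing_by
  · simp only [List.length_cons]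
    exact Nat.lt_succ_of_le (List.length_dropWhile_le _ _)
  · simp only [List.length_cons]
    exact Nat.lt_succ_of_le (Nat.le_refl _)

def pvB_pad (clues : List (List Int)) : Nat × List (List Int) :=
  let m := ((clues.map List.length).max?).getD 0
  (m, clues.map (fun c => List.replicate (m - c.length) 0 ++ c))

def nonogram_encode_alt (data : List String) : List (List (List Int)) :=
  let rc := (pvB_pad (data.map (fun row => pvB_runs row.toList))).2
  let w := (data.headD "").toList.length
  let cols := (List.range w).map (fun i => data.map (fun row => row.toList.getD i ' '))
  let p := pvB_pad (cols.map pvB_runs)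
  let cc := (List.range p.1).map (fun i => p.2.map (fun col => col.getD i 0))
  [cc, rc]

-- ===== PRECONDITION & SPEC =====
-- Pre_ excludes exactly the inputs where A raises: an empty grid or an empty first row
-- (ValueError from max() on an empty sequence) and a row shorter than the first row
-- (IndexError in rotate); A returns normally everywhere else.
def Pre_nonogram_encode (data : List String) : Prop :=
  data ≠ [] ∧ 0 < (data.headD "").toList.length ∧
    ∀ s ∈ data, (data.headD "").toList.length ≤ s.toList.length
instance (data : List String) : Decidable (Pre_nonogram_encode data) := by
  unfold Pre_nonogram_encode; infer_instance

def pvWitness_nonogram_encode : List String := ["X.", ".X"]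

def Spec_nonogram_encode (data : List String) (out : List (List (List Int))) : Prop := out = nonogram_encode_alt data
instance (data : List String) (out : List (List (List Int))) : Decidable (Spec_nonogram_encode data out) := by unfold Spec_nonogram_encode; infer_instance

-- ===== CLAIM (what is proved, stated in full; the proofs are below) =====
def Claim_equal_nonogram_encode : Prop := ∀ (data : List String), Dom_nonogram_encode data → Pre_nonogram_encode data → Spec_nonogram_encode data (nonogram_encode data)

-- ===== LEMMAS AND PROOFS =====

-- abbreviations for A's counter-loop body and finisher (definitionally equal to the inline lambdas)
def pvStep (st : List Int × Int) (sub : Char) : List Int × Int :=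
  if sub = 'X' then (st.1, st.2 + 1) else (if st.2 ≠ 0 then st.1 ++ [st.2] else st.1, 0)

def pvFin (st : List Int × Int) : List Int := if st.2 ≠ 0 then st.1 ++ [st.2] else st.1

theorem pv_clueLine_eq_fin (item : List Char) :
    pvA_clueLine item = pvFin (item.foldl pvStep ([], 0)) := rfl

theorem pvFin_append (a b : List Int) (s : Int) : pvFin (a ++ b, s) = a ++ pvFin (b, s) := by
  by_cases hs : s ≠ 0 <;> simp [pvFin, hs, List.append_assoc]

-- the loop only appends to the first component
theorem pv_foldl_step_append (item : List Char) (t : List Int) (c : Int) :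
    item.foldl pvStep (t, c) =
      ((t ++ (item.foldl pvStep ([], c)).1, (item.foldl pvStep ([], c)).2)) := by
  induction item generalizing t c with
  | nil => simp
  | cons sub rest ih =>
    simp only [List.foldl_cons, pvStep]
    by_cases hx : sub = 'X'
    · rw [if_pos hx, if_pos hx]
      exact ih t (c + 1)
    · rw [if_neg hx, if_neg hx]
      by_cases hc : c ≠ 0
      · rw [if_pos hc, if_pos hc, ih (t ++ [c]) 0, ih ([] ++ [c]) 0]
        simp [List.append_assoc]
      · rw [if_neg hc, if_neg hc]
        exact ih t 0

-- B strips leading runs: unfolding lemma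
theorem pv_runs_strip (s : List Char) :
    pvB_runs s = (if (s.takeWhile (fun x => x = 'X')).length ≠ 0
        then [((s.takeWhile (fun x => x = 'X')).length : Int)] else [])
      ++ pvB_runs (s.dropWhile (fun x => x = 'X')) := by
  cases s with
  | nil => simp [pvB_runs]
  | cons c rest =>
    by_cases hx : c = 'X'
    · rw [pvB_runs]
      simp [hx]
    · rw [show List.takeWhile (fun x => x = 'X') (c :: rest) = [] from by simp [hx],
          show List.dropWhile (fun x => x = 'X') (c :: rest) = c :: rest from by simp [hx]]
      simp

-- main invariant of A's counter loop
theorem pv_clue_inv (item : List Char) : ∀ (c : Nat),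
    pvFin (item.foldl pvStep ([], (c : Int))) =
      (if c + (item.takeWhile (fun x => x = 'X')).length ≠ 0
        then [((c + (item.takeWhile (fun x => x = 'X')).length : Nat) : Int)] else [])
      ++ pvB_runs (item.dropWhile (fun x => x = 'X')) := by
  induction item with
  | nil =>
    intro c
    simp [pvFin, pvB_runs]
  | cons sub rest ih =>
    intro c
    by_cases hx : sub = 'X'
    · subst hx
      rw [List.foldl_cons]
      have hstep : pvStep ([], (c : Int)) 'X' = ([], ((c + 1 : Nat) : Int)) := by
        simp [pvStep]
      rw [hstep, ih (c + 1)]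
      have ht : ('X' :: rest).takeWhile (fun x => x = 'X')
          = 'X' :: rest.takeWhile (fun x => x = 'X') := by simp
      have hd : ('X' :: rest).dropWhile (fun x => x = 'X')
          = rest.dropWhile (fun x => x = 'X') := by simp
      rw [ht, hd]
      have h1 : c + 1 + (rest.takeWhile (fun x => x = 'X')).length ≠ 0 := by omega
      have h2 : c + ('X' :: rest.takeWhile (fun x => x = 'X')).length ≠ 0 := by simp
      rw [if_pos h1, if_pos h2]
      have h3 : c + 1 + (rest.takeWhile (fun x => x = 'X')).length
          = c + ('X' :: rest.takeWhile (fun x => x = 'X')).length := by simp; omega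
      rw [h3]
    · rw [List.foldl_cons]
      have hstep : pvStep ([], (c : Int)) sub
          = ((if (c : Int) ≠ 0 then [(c : Int)] else []), ((0 : Nat) : Int)) := by
        simp [pvStep, hx]
      rw [hstep, pv_foldl_step_append rest _ _, pvFin_append, ih 0]
      have htw : (sub :: rest).takeWhile (fun x => x = 'X') = [] := by
        simp [List.takeWhile_cons, hx]
      have hdw : (sub :: rest).dropWhile (fun x => x = 'X') = sub :: rest := by
        simp [List.dropWhile_cons, hx]
      rw [htw, hdw]
      have hruns : pvB_runs (sub :: rest) = pvB_runs rest := by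
        rw [pvB_runs]; simp [hx]
      rw [hruns, pv_runs_strip rest]
      by_cases hc : c = 0
      · subst hc; simp
      · have hcI : (c : Int) ≠ 0 := by exact_mod_cast hc
        simp [hc]

theorem pv_clueLine_eq_runs (item : List Char) : pvA_clueLine item = pvB_runs item := by
  rw [pv_clueLine_eq_fin]
  have h0 : ((0 : Int)) = ((0 : Nat) : Int) := rfl
  rw [h0, pv_clue_inv item 0]
  simp only [zero_add]
  rw [← pv_runs_strip]

-- A's while-prepend padding is a computed zero prefix
theorem pv_fill_eq (m : Nat) (item : List Int) :
    pvA_fill m item = List.replicate (m - item.length) 0 ++ item := by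
  fun_induction pvA_fill m item with
  | case1 item h ih =>
    rw [ih]
    have : m - item.length = (m - (0 :: item).length) + 1 := by
      simp only [List.length_cons]; omega
    rw [this, List.replicate_succ']
    simp
  | case2 item h =>
    have : m - item.length = 0 := by omega
    simp [this]

-- A's max(result, key=len) and B's max over lengths agree
theorem pv_maxlen_eq (r : List (List Int)) (h : r ≠ []) :
    ((PySem.List.max? r (fun l => l.length)).getD []).length = ((r.map List.length).max?).getD 0 := by
  obtain ⟨a, ha⟩ : ∃ a, PySem.List.max? r (fun l => l.length) = some a := by
    cases hm : PySem.List.max? r (fun l => l.length) with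
    | none => exact absurd ((PySem.List.max?_eq_none_iff _ _).mp hm) h
    | some a => exact ⟨a, rfl⟩
  obtain ⟨b, hb⟩ : ∃ b, (r.map List.length).max? = some b := by
    cases hm : (r.map List.length).max? with
    | none => exact absurd (List.max?_eq_none_iff.mp hm) (by simpa using h)
    | some b => exact ⟨b, rfl⟩
  rw [ha, hb]
  simp only [Option.getD_some]
  have hamem := PySem.List.max?_mem ha
  have hamax := PySem.List.max?_isMax ha
  have hbmem : b ∈ r.map List.length := List.max?_mem hb
  have hble : a.length ≤ b := by
    have h2 : a.length ≤ ((r.map List.length).max?).getD 0 :=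
      List.le_max?_getD_of_mem (List.mem_map_of_mem hamem)
    rwa [hb, Option.getD_some] at h2
  obtain ⟨l, hl, rfl⟩ := List.mem_map.mp hbmem
  exact Nat.le_antisymm hble (hamax l hl)

-- clue = runs + pad
theorem pv_clue_eq (side : List (List Char)) (h : side ≠ []) :
    pvA_clue side = (pvB_pad (side.map pvB_runs)).2 := by
  unfold pvA_clue pvB_pad
  rw [PySem.List.foldl_append_singleton_eq_map, PySem.List.foldl_append_singleton_eq_map]
  have hmap : side.map (fun item => pvA_clueLine item) = side.map pvB_runs :=
    List.map_congr_left (fun x _ => pv_clueLine_eq_runs x)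
  simp only [List.nil_append]
  rw [hmap, pv_maxlen_eq _ (by simpa using h)]
  simp only [List.map_map]
  refine List.map_congr_left (fun c _ => ?_)
  simp [Function.comp, pv_fill_eq]

-- every padded list has the max length
theorem pv_pad_len (clues : List (List Int)) (l : List Int) (hl : l ∈ (pvB_pad clues).2) :
    l.length = (pvB_pad clues).1 := by
  unfold pvB_pad at hl ⊢
  simp only [List.mem_map] at hl
  obtain ⟨c, hc, rfl⟩ := hl
  have : c.length ≤ ((clues.map List.length).max?).getD 0 :=
    List.le_max?_getD_of_mem (List.mem_map_of_mem hc)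
  simp only [List.length_append, List.length_replicate]
  omega

-- zip(*ls) on equal-length lists is index transposition
theorem pv_zipStar_eq (m : Nat) : ∀ (ls : List (List Int)), ls ≠ [] →
    (∀ l ∈ ls, l.length = m) →
    pvA_zipStar ls = (List.range m).map (fun i => ls.map (fun col => col.getD i 0)) := by
  induction m with
  | zero =>
    intro ls hne hlen
    rw [pvA_zipStar, dif_neg]
    · simp
    · intro ⟨h1, h2⟩
      obtain ⟨a, t, rfl⟩ := List.exists_cons_of_ne_nil hne
      have := hlen a (by simp)
      simp only [List.length_eq_zero_iff] at this
      simp [this] at h2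
  | succ n ih =>
    intro ls hne hlen
    have hall : ∀ l ∈ ls, l ≠ [] := fun l hl => by
      have := hlen l hl; intro h; simp [h] at this
    rw [pvA_zipStar, dif_pos ⟨hne, by
      simp only [List.all_eq_true, Bool.not_eq_eq_eq_not, Bool.not_true, List.isEmpty_eq_false_iff]
      exact hall⟩]
    rw [ih (ls.map List.tail) (by simpa using hne)
      (by intro l hl
          simp only [List.mem_map] at hl
          obtain ⟨x, hx, rfl⟩ := hl
          have := hlen x hx
          simp only [List.length_tail]
          omega)]
    rw [List.range_succ_eq_map]
    simp only [List.map_cons, List.map_map]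
    congr 1
    · exact List.map_congr_left (fun col hcol => by
        obtain ⟨x, xs, rfl⟩ := List.exists_cons_of_ne_nil (hall col hcol)
        simp)
    · refine List.map_congr_left (fun i _ => ?_)
      simp only [Function.comp_apply]
      refine List.map_congr_left (fun col hcol => ?_)
      obtain ⟨x, xs, rfl⟩ := List.exists_cons_of_ne_nil (hall col hcol)
      simp [Function.comp]

-- A's rotate builds exactly B's indexed columns
theorem pv_rotate_eq (data : List String) :
    pvA_rotate data = (List.range ((data.headD "").toList.length)).map
      (fun i => data.map (fun row => row.toList.getD i ' ')) := by
  unfold pvA_rotate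
  rw [PySem.List.pyRange_zero_natCast, PySem.List.foldl_append_singleton_eq_map]
  simp only [List.nil_append, List.map_map]
  refine List.map_congr_left (fun i _ => ?_)
  simp only [Function.comp_apply]
  rw [PySem.List.foldl_append_singleton_eq_map]
  simp only [List.nil_append]
  refine List.map_congr_left (fun row _ => ?_)
  rw [PySem.List.pyGet?_natCast, ← List.getD_eq_getElem?_getD]

-- ===== VERDICT (by name: the statement is the Claim_ definition above) =====
theorem nonogram_encode_spec : Claim_equal_nonogram_encode := by
  intro data _ hpre
  obtain ⟨hne, hw, hrows⟩ := hpre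
  unfold Spec_nonogram_encode nonogram_encode nonogram_encode_alt
  show [pvA_zipStar (pvA_clue (pvA_rotate data)), pvA_clue (data.map String.toList)]
      = [(List.range (pvB_pad (((List.range ((data.headD "").toList.length)).map
            (fun i => data.map (fun row => row.toList.getD i ' '))).map pvB_runs)).1).map
          (fun i => (pvB_pad (((List.range ((data.headD "").toList.length)).map
            (fun i => data.map (fun row => row.toList.getD i ' '))).map pvB_runs)).2.map
            (fun col => col.getD i 0)),
         (pvB_pad (data.map (fun row => pvB_runs row.toList))).2]
  have hrc : pvA_clue (data.map String.toList)
      = (pvB_pad (data.map (fun row => pvB_runs row.toList))).2 := by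
    rw [pv_clue_eq _ (by simpa using hne), List.map_map]
    rfl
  have hcolsne : (List.range ((data.headD "").toList.length)).map
      (fun i => data.map (fun row => row.toList.getD i ' ')) ≠ [] := by
    simp only [ne_eq, List.map_eq_nil_iff, List.range_eq_nil]
    omega
  have hpadne : (pvB_pad (((List.range ((data.headD "").toList.length)).map
      (fun i => data.map (fun row => row.toList.getD i ' '))).map pvB_runs)).2 ≠ [] := by
    unfold pvB_pad
    simpa using hcolsne
  have hcc : pvA_zipStar (pvA_clue (pvA_rotate data))
      = (List.range (pvB_pad (((List.range ((data.headD "").toList.length)).map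
            (fun i => data.map (fun row => row.toList.getD i ' '))).map pvB_runs)).1).map
          (fun i => (pvB_pad (((List.range ((data.headD "").toList.length)).map
            (fun i => data.map (fun row => row.toList.getD i ' '))).map pvB_runs)).2.map
            (fun col => col.getD i 0)) := by
    rw [pv_rotate_eq, pv_clue_eq _ hcolsne]
    exact pv_zipStar_eq _ _ hpadne (fun l hl => pv_pad_len _ l hl)
  rw [hrc, hcc]
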